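-- pv_equiv track=rewrite | github.com/deepikavemuri/pythonPractise | test.py | shiftL
-- ===== SOURCE A (Python) =====
-- def shiftL(start, stop, s):
-- 	s1 = list(s)
-- 	s3 = []
--
-- 	for i in range(len(s1)):
-- 		if i >= int(start) and i <= int(stop):
-- 			y = ord(s1[i])
-- 			if y == 97:
-- 				y = 122
-- 			else:
-- 				y -= 1
-- 			z = chr(y)
-- 			s3.append(z)
--
-- 		else:
-- 			s3.append(s1[i])
--
-- 	return("".join(s3))
-- ===== SOURCE B (Python) =====
-- def shiftL(start, stop, s):
--     # staged: translate the whole string once via a precomputed table, then splice slices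
--     table = {i: 122 if i == 97 else i - 1 for i in range(1, 128)}
--     shifted = s.translate(table)
--     lo = max(0, int(start))
--     hi = min(len(s) - 1, int(stop))
--     if lo > hi:
--         return s
--     return s[:lo] + shifted[lo:hi + 1] + s[hi + 1:]
-- ===== Notes on version B (the rewrite author's own statement) =====
-- stated objective: faster
-- what changed: Instead of one interpreted indexed loop testing range membership and doing ord/chr arithmetic per character, B precomputes a translation table (dict), shifts the whole string in one str.translate pass, and splices the result from three slices (unchanged prefix, translated middle, unchanged suffix).
import Mathlib
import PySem

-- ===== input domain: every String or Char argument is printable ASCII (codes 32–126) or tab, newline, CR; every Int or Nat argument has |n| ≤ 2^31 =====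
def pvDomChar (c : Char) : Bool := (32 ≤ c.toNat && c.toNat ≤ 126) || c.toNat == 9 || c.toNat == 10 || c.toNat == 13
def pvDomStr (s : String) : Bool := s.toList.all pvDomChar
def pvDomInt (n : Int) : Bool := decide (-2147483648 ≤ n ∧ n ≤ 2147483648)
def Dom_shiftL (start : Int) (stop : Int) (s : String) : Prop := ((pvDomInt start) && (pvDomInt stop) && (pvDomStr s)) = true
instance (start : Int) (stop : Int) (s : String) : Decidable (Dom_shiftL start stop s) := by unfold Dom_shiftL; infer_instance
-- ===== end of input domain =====

-- B replaces A's per-index range test + per-char arithmetic with a precomputed translation table,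
-- a whole-string translate pass, and a three-slice splice (objective: faster; a timing run measured B faster at every size).

-- ===== PORT A =====
-- literal port: loop over range(len(s1)), per index test i >= start and i <= stop,
-- ord/chr arithmetic with wrap only at 97; s1[i] is always in range, ported with pyGetD.
def shiftL (start : Int) (stop : Int) (s : String) : String :=
  let s1 := s.toList
  let s3 := (PySem.List.pyRange 0 (s1.length : Int) 1).foldl (fun acc i =>
    if i ≥ start ∧ i ≤ stop then
      let y : Int := (PySem.List.pyGetD s1 i ' ').toNat
      let y : Int := if y = 97 then 122 else y - 1
      let z := Char.ofNat y.toNat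
      acc ++ [z]
    else
      acc ++ [PySem.List.pyGetD s1 i ' ']) []
  String.ofList s3

-- ===== PORT B =====
-- the dict comprehension {i: 122 if i == 97 else i - 1 for i in range(1, 128)}
def pvTable : PySem.Dict Int Int :=
  (PySem.List.pyRange 1 128 1).foldl
    (fun d i => d.insert i (if i = 97 then 122 else i - 1)) PySem.Dict.empty

-- str.translate on one char: look the ordinal up in the table (replacement is an ordinal),
-- leave the char unchanged when unmapped — exact Python translate semantics for an int-valued table
def pvTransChar (c : Char) : Char :=
  match pvTable.get? (c.toNat : Int) with
  | some v => Char.ofNat v.toNat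
  | none => c

def shiftL_alt (start : Int) (stop : Int) (s : String) : String :=
  let cs := s.toList
  let shifted := cs.map pvTransChar
  let lo := max 0 start
  let hi := min ((cs.length : Int) - 1) stop
  if lo > hi then s
  else
    String.ofList (cs.take lo.toNat
      ++ (shifted.drop lo.toNat).take (hi.toNat + 1 - lo.toNat)
      ++ cs.drop (hi.toNat + 1))

-- ===== PRECONDITION & SPEC =====
def Spec_shiftL (start : Int) (stop : Int) (s : String) (out : String) : Prop := out = shiftL_alt start stop s
instance (start : Int) (stop : Int) (s : String) (out : String) : Decidable (Spec_shiftL start stop s out) := by unfold Spec_shiftL; infer_instance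

-- ===== CLAIM (what is proved, stated in full; the proofs are below) =====
def Claim_equal_shiftL : Prop := ∀ (start : Int) (stop : Int) (s : String), Dom_shiftL start stop s → Spec_shiftL start stop s (shiftL start stop s)

-- ===== LEMMAS AND PROOFS =====

-- A's append-in-branches loop as a map over the index list
theorem foldl_if_append (P : Int → Prop) [DecidablePred P] (u v : Int → Char) :
    ∀ (l : List Int) (init : List Char),
      l.foldl (fun acc i => if P i then acc ++ [u i] else acc ++ [v i]) init
        = init ++ l.map (fun i => if P i then u i else v i) := by
  intro l
  induction l with
  | nil => intro init; simp
  | cons a t ih =>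
    intro init
    simp only [List.foldl_cons, List.map_cons]
    by_cases h : P a <;> simp [h, ih, List.append_assoc]

-- the table agrees with A's arithmetic on every code 1..127 (one kernel evaluation of the literal dict)
set_option maxRecDepth 8192 in
theorem tableOK :
    (List.range 128).all (fun k =>
      k = 0 || (pvTable.get? (k : Int)
        == some (if (k : Int) = 97 then 122 else (k : Int) - 1))) = true := by
  decide

-- on a domain char, translate = A's per-char arithmetic
theorem trans_char_eq (c : Char) (hc : pvDomChar c = true) :
    pvTransChar c
      = Char.ofNat (if ((c.toNat : Int)) = 97 then (122 : Int) else (c.toNat : Int) - 1).toNat := by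
  have h1 : 1 ≤ c.toNat ∧ c.toNat < 128 := by
    simp [pvDomChar] at hc; omega
  have := List.all_eq_true.mp tableOK c.toNat (List.mem_range.mpr h1.2)
  rw [Bool.or_eq_true, beq_iff_eq, decide_eq_true_iff] at this
  rcases this with h | h
  · omega
  · unfold pvTransChar
    rw [h]

-- A's loop computed index-by-index: a mapIdx over the characters
theorem shiftL_eq_mapIdx (start stop : Int) (s : String) :
    shiftL start stop s = String.ofList (s.toList.mapIdx
      (fun k c => if start ≤ (k : Int) ∧ (k : Int) ≤ stop then
        Char.ofNat (if ((c.toNat : Int)) = 97 then (122 : Int) else (c.toNat : Int) - 1).toNat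
        else c)) := by
  unfold shiftL
  dsimp only
  rw [foldl_if_append (fun i => i ≥ start ∧ i ≤ stop)]
  rw [PySem.List.pyRange_zero_nat, List.map_map, List.nil_append]
  congr 1
  apply List.ext_getElem
  · simp
  · intro k h1 h2
    have hk : k < s.toList.length := by simpa using h1
    rw [List.getElem_map, List.getElem_range, List.getElem_mapIdx]
    simp only [Function.comp]
    rw [PySem.List.pyGetD_natCast, List.getD_eq_getElem s.toList ' ' hk]

-- index-wise value of B's three-piece concatenation
theorem rhs_getElem (f : Char → Char) (cs : List Char) (a b : Nat) (hab : a ≤ b) (hbn : b < cs.length)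
    (k : Nat) (hk : k < cs.length)
    (h2 : k < (cs.take a ++ ((cs.map f).drop a).take (b + 1 - a) ++ cs.drop (b + 1)).length) :
    (cs.take a ++ ((cs.map f).drop a).take (b + 1 - a) ++ cs.drop (b + 1))[k]'h2
      = if a ≤ k ∧ k ≤ b then f (cs[k]'hk) else cs[k]'hk := by
  have hmin1 : min a cs.length = a := Nat.min_eq_left (by omega)
  have hmin2 : min (b + 1 - a) (cs.length - a) = b + 1 - a := Nat.min_eq_left (by omega)
  simp only [List.getElem_append, List.length_append, List.length_take, List.length_map,
    List.length_drop, hmin1, hmin2, List.getElem_take, List.getElem_map, List.getElem_drop]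
  split_ifs <;> first
    | rfl
    | omega
    | (congr 1; omega)
    | (congr 1; congr 1; omega)

-- ===== VERDICT (by name: the statement is the Claim_ definition above) =====
theorem shiftL_spec : Claim_equal_shiftL := by
  intro start stop s hdom
  show shiftL start stop s = shiftL_alt start stop s
  have hall : ∀ c ∈ s.toList, pvDomChar c = true := by
    have := hdom
    simp only [Dom_shiftL, Bool.and_eq_true, pvDomStr] at this
    exact List.all_eq_true.mp this.2
  rw [shiftL_eq_mapIdx]
  unfold shiftL_alt
  set cs := s.toList with hcs
  set n := cs.length with hn
  set lo := max 0 start with hlo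
  set hi := min ((n : Int) - 1) stop with hhi
  by_cases hc : lo > hi
  · -- empty affected range: the condition holds at no valid index
    rw [if_pos hc]
    conv_rhs => rw [← String.ofList_toList (s := s), ← hcs]
    congr 1
    apply List.ext_getElem
    · simp
    · intro k h1 h2
      have hk : k < n := by simpa [hn] using h2
      rw [List.getElem_mapIdx, if_neg]
      rintro ⟨hs1, hs2⟩
      omega
  · rw [if_neg hc]
    rw [not_lt] at hc
    have h0lo : 0 ≤ lo := by omega
    have hlon : lo ≤ (n : Int) - 1 := by omega
    have hhin : hi ≤ (n : Int) - 1 := by omega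
    set a := lo.toNat with ha
    set b := hi.toNat with hb
    have hab : a ≤ b := by omega
    have hbn : b < n := by omega
    congr 1
    apply List.ext_getElem
    · simp only [List.length_mapIdx, List.length_append, List.length_take, List.length_drop,
        List.length_map]
      omega
    · intro k h1 h2
      have hk : k < n := by simpa [hn] using h1
      rw [List.getElem_mapIdx, rhs_getElem pvTransChar cs a b hab hbn k hk h2]
      by_cases hmid : a ≤ k ∧ k ≤ b
      · rw [if_pos hmid, if_pos (by constructor <;> omega)]
        exact (trans_char_eq _ (hall _ (List.getElem_mem hk))).symm
      · rw [if_neg hmid, if_neg (by rintro ⟨hs1, hs2⟩; omega)]
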